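-- pv_equiv track=rewrite | github.com/keshuigu/my-leet-code | solution/solution_2501_3000.py | solution_2696
-- ===== SOURCE A (Python) =====
-- def solution_2696(s: str) -> int:
--     stack = []
--     for ch in s:
--         if not stack:
--             stack.append(ch)
--         elif (ch == 'B' and stack[-1] == 'A') or (ch == 'D' and stack[-1] == 'C'):
--             stack.pop()
--         else:
--             stack.append(ch)
--     return len(stack)
-- ===== SOURCE B (Python) =====
-- def solution_2696(s: str) -> int:
--     # Rewrite to a normal form: repeatedly delete the first "AB" (or, failing
--     # that, the first "CD") occurrence until neither substring remains; the
--     # rewrite system is confluent since the two patterns cannot overlap.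
--     i = s.find('AB')
--     if i == -1:
--         i = s.find('CD')
--     if i == -1:
--         return len(s)
--     return solution_2696(s[:i] + s[i + 2:])
-- ===== Notes on version B (the rewrite author's own statement) =====
-- stated objective: alternative
-- what changed: B replaces A's single left-to-right stack pass by a recursive rewrite-to-fixed-point: it repeatedly finds and deletes one occurrence of the first pattern (else the second) until none remains, relying on confluence of the non-overlapping rewrite system; its scanning/slicing runs in C, which a timing run measured as faster despite the worse worst case.
import Mathlib
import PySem

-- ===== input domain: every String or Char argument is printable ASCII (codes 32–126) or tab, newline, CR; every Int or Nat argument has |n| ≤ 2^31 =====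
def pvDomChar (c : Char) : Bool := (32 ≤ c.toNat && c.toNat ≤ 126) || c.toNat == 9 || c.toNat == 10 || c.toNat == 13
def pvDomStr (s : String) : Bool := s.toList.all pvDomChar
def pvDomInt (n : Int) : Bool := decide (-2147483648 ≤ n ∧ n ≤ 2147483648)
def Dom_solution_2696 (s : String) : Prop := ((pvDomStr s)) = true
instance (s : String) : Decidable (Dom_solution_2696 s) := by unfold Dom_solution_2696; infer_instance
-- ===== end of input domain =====

-- B recursively deletes the first "AB"/"CD" occurrence until neither remains
-- (rewrite to a fixed point) instead of A's one-pass stack; same result by confluence.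

-- ===== PORT A =====
-- one loop step of A: append on empty stack, pop when the closer matches stack[-1], else append
def stepA (stack : List Char) (ch : Char) : List Char :=
  if stack = [] then stack ++ [ch]
  else if (ch = 'B' ∧ stack.getLast? = some 'A') ∨ (ch = 'D' ∧ stack.getLast? = some 'C') then
    stack.dropLast
  else stack ++ [ch]

def solution_2696 (s : String) : Int :=
  ((s.toList.foldl stepA []).length : Int)

-- ===== PORT B =====
-- i = s.find('AB'); if i == -1: i = s.find('CD')  — the index B deletes at
def pickIdx (l : List Char) : Int :=
  if PySem.Chars.find l ['A', 'B'] = -1 then PySem.Chars.find l ['C', 'D']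
  else PySem.Chars.find l ['A', 'B']

-- facts about a hit, cited by solGo's decreasing_by (and the proofs below):
-- the chosen index is nonneg, a matching pair sits there, and it fits in the list
theorem pickIdx_spec (l : List Char) (h : pickIdx l ≠ -1) :
    0 ≤ pickIdx l ∧ (pickIdx l).toNat + 2 ≤ l.length ∧
      ∃ x y, ((x = 'A' ∧ y = 'B') ∨ (x = 'C' ∧ y = 'D')) ∧ [x, y] <+: l.drop (pickIdx l).toNat := by
  have hfound : 0 ≤ pickIdx l ∧
      ∃ x y, ((x = 'A' ∧ y = 'B') ∨ (x = 'C' ∧ y = 'D')) ∧ [x, y] <+: l.drop (pickIdx l).toNat := by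
    unfold pickIdx at h ⊢
    split_ifs at h ⊢ with h0
    · have hge : 0 ≤ PySem.Chars.find l ['C', 'D'] := by
        have := PySem.Chars.neg_one_le_find l ['C', 'D']; omega
      exact ⟨hge, 'C', 'D', Or.inr ⟨rfl, rfl⟩, (PySem.Chars.find_spec hge).1⟩
    · have hge : 0 ≤ PySem.Chars.find l ['A', 'B'] := by
        have := PySem.Chars.neg_one_le_find l ['A', 'B']; omega
      exact ⟨hge, 'A', 'B', Or.inl ⟨rfl, rfl⟩, (PySem.Chars.find_spec hge).1⟩
  obtain ⟨hge, x, y, hxy, hpre⟩ := hfound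
  have hlen := hpre.length_le
  simp only [List.length_cons, List.length_nil, List.length_drop] at hlen
  exact ⟨hge, by omega, x, y, hxy, hpre⟩

-- recursive body of B: find the first 'AB' (else the first 'CD'), delete it, recurse
def solGo (l : List Char) : Int :=
  let i := pickIdx l
  if _hi : i = -1 then (l.length : Int)
  else solGo (PySem.List.slice l none (some i) ++ PySem.List.slice l (some (i + 2)) none)
termination_by l.length
decreasing_by
  have hi' : pickIdx l ≠ -1 := _hi
  obtain ⟨hge, hbound, -⟩ := pickIdx_spec l hi'
  show (PySem.List.slice l none (some (pickIdx l)) ++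
      PySem.List.slice l (some (pickIdx l + 2)) none).length < l.length
  rw [PySem.List.slice_to l hge, PySem.List.slice_from l (by omega)]
  simp only [List.length_append, List.length_take, List.length_drop]
  omega

def solution_2696_alt (s : String) : Int := solGo s.toList

-- ===== PRECONDITION & SPEC =====
def Spec_solution_2696 (s : String) (out : Int) : Prop := out = solution_2696_alt s
instance (s : String) (out : Int) : Decidable (Spec_solution_2696 s out) := by unfold Spec_solution_2696; infer_instance

-- ===== CLAIM (what is proved, stated in full; the proofs are below) =====
def Claim_equal_solution_2696 : Prop := ∀ (s : String), Dom_solution_2696 s → Spec_solution_2696 s (solution_2696 s)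

-- ===== LEMMAS AND PROOFS =====

-- head-of-list version of A's loop step (the stack kept reversed)
def hstepA : List Char → Char → List Char
  | [], c => [c]
  | h :: t, c => if (c = 'B' ∧ h = 'A') ∨ (c = 'D' ∧ h = 'C') then t else c :: h :: t

-- one right-to-left reduction step and the normal form it computes
def hstepB : List Char → Char → List Char
  | [], c => [c]
  | h :: t, c => if (c = 'A' ∧ h = 'B') ∨ (c = 'C' ∧ h = 'D') then t else c :: h :: t

def redB : List Char → List Char
  | [] => []
  | c :: t => hstepB (redB t) c

-- adjacent pair carries no redex
def ok2 (x y : Char) : Prop := ¬ ((x = 'A' ∧ y = 'B') ∨ (x = 'C' ∧ y = 'D'))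

lemma stepA_rev (rs : List Char) (c : Char) : stepA rs.reverse c = (hstepA rs c).reverse := by
  cases rs with
  | nil => simp [stepA, hstepA]
  | cons h t =>
      simp only [stepA, hstepA, List.reverse_cons]
      rw [if_neg (by simp)]
      simp only [List.getLast?_concat, List.dropLast_concat, Option.some.injEq]
      split_ifs with h1 <;> simp

lemma foldl_stepA (l : List Char) : ∀ rs : List Char,
    List.foldl stepA rs.reverse l = (List.foldl hstepA rs l).reverse := by
  induction l with
  | nil => intro rs; rfl
  | cons c t ih =>
      intro rs
      simp only [List.foldl_cons, stepA_rev, ih]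

-- an opener/closer pair pushed onto any stack cancels out
lemma hstepA_cancel (rs : List Char) (c b : Char)
    (h : (c = 'A' ∧ b = 'B') ∨ (c = 'C' ∧ b = 'D')) :
    hstepA (hstepA rs c) b = rs := by
  rcases h with ⟨rfl, rfl⟩ | ⟨rfl, rfl⟩ <;>
  · cases rs with
    | nil => simp [hstepA]
    | cons h t => simp [hstepA]

-- reducing the remaining input first does not change A's fold
lemma foldl_hstepA_redB (l : List Char) : ∀ rs : List Char,
    List.foldl hstepA rs l = List.foldl hstepA rs (redB l) := by
  induction l with
  | nil => intro rs; rfl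
  | cons c t ih =>
      intro rs
      simp only [List.foldl_cons, redB]
      rcases hrt : redB t with _ | ⟨b, r⟩
      · simp [ih, hrt, hstepB]
      · by_cases hm : (c = 'A' ∧ b = 'B') ∨ (c = 'C' ∧ b = 'D')
        · simp only [hstepB, if_pos hm]
          rw [ih, hrt]
          simp [hstepA_cancel rs c b hm]
        · simp only [hstepB, if_neg hm]
          rw [ih, hrt]
          simp

lemma chain_redB (l : List Char) : List.IsChain ok2 (redB l) := by
  induction l with
  | nil => exact List.isChain_nil
  | cons c t ih =>
      rcases hrt : redB t with _ | ⟨b, r⟩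
      · simp [redB, hrt, hstepB]
      · rw [hrt] at ih
        by_cases hm : (c = 'A' ∧ b = 'B') ∨ (c = 'C' ∧ b = 'D')
        · simpa [redB, hrt, hstepB, if_pos hm] using ih.tail
        · simp only [redB, hrt, hstepB, if_neg hm]
          exact List.isChain_cons_cons.mpr ⟨hm, ih⟩

-- on a redex-free input A's fold only pushes
lemma foldl_hstepA_nf (t : List Char) : ∀ rs : List Char,
    List.IsChain ok2 (rs.reverse ++ t) → List.foldl hstepA rs t = t.reverse ++ rs := by
  induction t with
  | nil => intro rs _; simp
  | cons c t2 ih =>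
      intro rs hch
      have hstep : hstepA rs c = c :: rs := by
        cases rs with
        | nil => rfl
        | cons h t' =>
            have hok : ok2 h c := by
              have := (List.isChain_append.mp hch).2.2
              exact this h (by simp) c (by simp)
            have : ¬ ((c = 'B' ∧ h = 'A') ∨ (c = 'D' ∧ h = 'C')) := by
              intro hc; exact hok (by tauto)
            simp [hstepA, this]
      have hch2 : List.IsChain ok2 ((c :: rs).reverse ++ t2) := by
        simpa [List.append_assoc] using hch
      simp only [List.foldl_cons, hstep, ih (c :: rs) hch2]
      simp

-- A's stack length is the length of the normal form
lemma redB_len (l : List Char) :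
    (List.foldl stepA [] l).length = (redB l).length := by
  have hA : List.foldl stepA [] l = (List.foldl hstepA [] l).reverse := by
    simpa using foldl_stepA l []
  have h2 : List.foldl hstepA [] l = (redB l).reverse := by
    rw [foldl_hstepA_redB l []]
    simpa using foldl_hstepA_nf (redB l) [] (by simpa using chain_redB l)
  simp [hA, h2]

-- redB splits across an append
lemma redB_append (u v : List Char) :
    redB (u ++ v) = u.foldr (fun c acc => hstepB acc c) (redB v) := by
  induction u with
  | nil => rfl
  | cons c t ih => simp [redB, ih]

-- deleting one adjacent redex preserves the normal form
lemma redB_delete (u v : List Char) (x y : Char)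
    (h : (x = 'A' ∧ y = 'B') ∨ (x = 'C' ∧ y = 'D')) :
    redB (u ++ x :: y :: v) = redB (u ++ v) := by
  rw [redB_append, redB_append]
  congr 1
  show hstepB (hstepB (redB v) y) x = redB v
  rcases h with ⟨rfl, rfl⟩ | ⟨rfl, rfl⟩ <;>
  · cases hrv : redB v with
    | nil => simp [hstepB]
    | cons h t => simp [hstepB]

-- no occurrence of either pattern means the string is redex-free
lemma chain_of_no_infix (l : List Char)
    (hab : ¬ ['A', 'B'] <:+: l) (hcd : ¬ ['C', 'D'] <:+: l) :
    List.IsChain ok2 l := by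
  induction l with
  | nil => exact List.isChain_nil
  | cons a t ih =>
      cases t with
      | nil => exact List.isChain_singleton a
      | cons b r =>
          refine List.isChain_cons_cons.mpr ⟨?_, ih ?_ ?_⟩
          · rintro (⟨rfl, rfl⟩ | ⟨rfl, rfl⟩)
            · exact hab ⟨[], r, by simp⟩
            · exact hcd ⟨[], r, by simp⟩
          · exact fun h => hab (List.infix_cons h)
          · exact fun h => hcd (List.infix_cons h)

-- a redex-free string is its own normal form
lemma redB_of_chain (l : List Char) (h : List.IsChain ok2 l) : redB l = l := by
  induction l with
  | nil => rfl
  | cons a t ih =>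
      cases t with
      | nil => rfl
      | cons b r =>
          have hok : ok2 a b := (List.isChain_cons_cons.mp h).1
          have ht := ih (List.isChain_cons_cons.mp h).2
          simp only [redB] at ht ⊢
          rw [ht]
          show hstepB (b :: r) a = a :: b :: r
          simp only [hstepB]
          exact if_neg hok

-- B computes the length of the normal form
lemma solGo_eq_redB (l : List Char) : solGo l = ((redB l).length : Int) := by
  generalize hn : l.length = n
  induction n using Nat.strong_induction_on generalizing l with
  | _ n ih =>
    unfold solGo
    show (if _ : pickIdx l = -1 then (l.length : Int)
          else solGo (PySem.List.slice l none (some (pickIdx l)) ++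
            PySem.List.slice l (some (pickIdx l + 2)) none)) = ((redB l).length : Int)
    by_cases hi : pickIdx l = -1
    · rw [dif_pos hi]
      have hmiss : ¬ ['A', 'B'] <:+: l ∧ ¬ ['C', 'D'] <:+: l := by
        unfold pickIdx at hi
        split_ifs at hi with h0
        · exact ⟨(PySem.Chars.find_eq_neg_one_iff l ['A', 'B']).mp h0,
            (PySem.Chars.find_eq_neg_one_iff l ['C', 'D']).mp hi⟩
        · exact absurd hi h0
      rw [redB_of_chain l (chain_of_no_infix l hmiss.1 hmiss.2)]
    · rw [dif_neg hi]
      obtain ⟨hge, hbound, x, y, hxy, hpre⟩ := pickIdx_spec l hi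
      obtain ⟨t, ht⟩ := hpre
      set j := (pickIdx l).toNat with hj
      have htdrop : t = l.drop (j + 2) := by
        have h1 : List.drop 2 (List.drop j l) = List.drop (j + 2) l := List.drop_drop
        rw [← ht] at h1
        simpa using h1
      have hsplit : l = l.take j ++ x :: y :: l.drop (j + 2) := by
        conv_lhs => rw [← List.take_append_drop j l]
        rw [← ht, htdrop]
        simp
      rw [PySem.List.slice_to l hge, PySem.List.slice_from l (by omega)]
      have h2 : (pickIdx l + 2).toNat = j + 2 := by omega
      rw [h2, ← hj]
      have hlen : (l.take j ++ l.drop (j + 2)).length < n := by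
        simp only [List.length_append, List.length_take, List.length_drop]
        omega
      rw [ih _ hlen _ rfl]
      conv_rhs => rw [hsplit]
      rw [redB_delete _ _ x y hxy]

-- ===== VERDICT (by name: the statement is the Claim_ definition above) =====
theorem solution_2696_spec : Claim_equal_solution_2696 := by
  intro s _
  unfold Spec_solution_2696 solution_2696 solution_2696_alt
  rw [solGo_eq_redB]
  exact_mod_cast redB_len s.toList
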